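-- pv_equiv track=rewrite | github.com/HuguesLej/Epitech-my_pgp | src/algo/aes.py | RCon
-- ===== SOURCE A (Python) =====
-- def RCon(word: list[int], i: int) -> list[int]:
--     if i == 0:
--         word[0] = 0
--     word[0] = 1
--     for _ in range(i - 1):
--         if word[0] & 0x80:
--             word[0] = (word[0] << 1) ^ 0x11b
--         else:
--             word[0] = word[0] << 1
--     return word
-- ===== SOURCE B (Python) =====
-- # AES round-constant via the precomputed xtime cycle of 1 in GF(2^8) (period 51):
-- # table lookup instead of repeated doubling. Mutates word[0] in place like the original.
-- _RCON = [1, 2, 4, 8, 16, 32, 64, 128, 27, 54, 108, 216, 171, 77, 154, 47, 94, 188,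
--          99, 198, 151, 53, 106, 212, 179, 125, 250, 239, 197, 145, 57, 114, 228,
--          211, 189, 97, 194, 159, 37, 74, 148, 51, 102, 204, 131, 29, 58, 116, 232,
--          203, 141]
--
--
-- def RCon(word, i):
--     if i <= 1:
--         word[0] = 1
--     else:
--         word[0] = _RCON[(i - 1) % 51]
--     return word
-- ===== Notes on version B (the rewrite author's own statement) =====
-- stated objective: simpler
-- what changed: Replaces the i-1 iterations of GF(2^8) doubling with a single lookup in a precomputed 51-entry RCON table (the xtime orbit of 1 has period 51), indexed by (i-1) % 51.
import Mathlib
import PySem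

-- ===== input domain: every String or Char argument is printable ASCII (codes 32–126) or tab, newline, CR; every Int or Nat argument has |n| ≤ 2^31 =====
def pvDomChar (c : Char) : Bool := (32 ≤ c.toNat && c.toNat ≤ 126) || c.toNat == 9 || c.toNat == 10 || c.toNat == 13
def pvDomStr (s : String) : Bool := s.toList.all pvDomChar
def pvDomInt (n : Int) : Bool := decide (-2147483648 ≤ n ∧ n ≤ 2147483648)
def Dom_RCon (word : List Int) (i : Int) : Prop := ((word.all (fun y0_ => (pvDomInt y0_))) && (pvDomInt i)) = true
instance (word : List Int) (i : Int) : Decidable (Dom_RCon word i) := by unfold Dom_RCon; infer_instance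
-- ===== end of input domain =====

-- B replaces A's i-1 doubling iterations by a single lookup in the precomputed period-51
-- RCON table. Both A and B mutate word[0] in place identically; the equivalence proved is
-- about the returned list value.

-- ===== PORT A =====
-- GF(2^8) doubling step; Python's 'word[0] << 1' is ported as '* 2' (exact for every Python int).
def pvStep (w : Int) : Int :=
  if PySem.Int.band w 0x80 ≠ 0 then PySem.Int.bxor (w * 2) 0x11b else w * 2

def RCon (word : List Int) (i : Int) : List Int :=
  let word := if i = 0 then word.set 0 0 else word
  let word := word.set 0 1
  (PySem.List.pyRange 0 (i - 1) 1).foldl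
    (fun w _ => w.set 0 (pvStep (PySem.List.pyGetD w 0 0))) word

-- ===== PORT B =====
def pvRCON : List Int :=
  [1, 2, 4, 8, 16, 32, 64, 128, 27, 54, 108, 216, 171, 77, 154, 47, 94, 188,
   99, 198, 151, 53, 106, 212, 179, 125, 250, 239, 197, 145, 57, 114, 228,
   211, 189, 97, 194, 159, 37, 74, 148, 51, 102, 204, 131, 29, 58, 116, 232,
   203, 141]

def RCon_alt (word : List Int) (i : Int) : List Int :=
  if i ≤ 1 then word.set 0 1
  else word.set 0 (PySem.List.pyGetD pvRCON (PySem.Int.mod (i - 1) 51) 0)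

-- ===== PRECONDITION & SPEC =====
-- Pre_ excludes only the empty list, on which Python A raises IndexError at 'word[0] = 1'.
def Pre_RCon (word : List Int) (i : Int) : Prop := word ≠ []
instance (word : List Int) (i : Int) : Decidable (Pre_RCon word i) := by unfold Pre_RCon; infer_instance
def pvWitness_RCon : List Int × Int := ([5], 3)

def Spec_RCon (word : List Int) (i : Int) (out : List Int) : Prop := out = RCon_alt word i
instance (word : List Int) (i : Int) (out : List Int) : Decidable (Spec_RCon word i out) := by unfold Spec_RCon; infer_instance

-- ===== CLAIM (what is proved, stated in full; the proofs are below) =====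
def Claim_equal_RCon : Prop := ∀ (word : List Int) (i : Int), Dom_RCon word i → Pre_RCon word i → Spec_RCon word i (RCon word i)

-- ===== LEMMAS AND PROOFS =====

-- The fold only ever touches index 0: over any index list it iterates pvStep on the head.
theorem pv_fold_val (l : List Int) (v : Int) (t : List Int) :
    l.foldl (fun w _ => w.set 0 (pvStep (PySem.List.pyGetD w 0 0))) (v :: t)
      = (pvStep^[l.length] v) :: t := by
  induction l generalizing v with
  | nil => rfl
  | cons a l ih =>
    have h0 : PySem.List.pyGetD (v :: t) 0 0 = v := by
      simp [PySem.List.pyGetD, PySem.List.pyIdx?, PySem.List.pyGet?]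
    simp only [List.foldl_cons, List.set_cons_zero, h0, List.length_cons, ih,
      Function.iterate_succ_apply]

set_option maxRecDepth 20000 in
theorem pv_tab_step : ∀ k : Nat, k < 50 → pvStep (pvRCON.getD k 0) = pvRCON.getD (k + 1) 0 := by
  decide

set_option maxRecDepth 20000 in
theorem pv_tab_last : pvStep (pvRCON.getD 50 0) = 1 := by decide

theorem pv_iter_tab : ∀ n : Nat, n ≤ 50 → pvStep^[n] 1 = pvRCON.getD n 0 := by
  intro n
  induction n with
  | zero => intro _; rfl
  | succ n ih =>
    intro h
    rw [Function.iterate_succ_apply', ih (by omega), pv_tab_step n (by omega)]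

theorem pv_step51 : pvStep^[51] 1 = 1 := by
  rw [show (51 : Nat) = 50 + 1 from rfl, Function.iterate_succ_apply',
    pv_iter_tab 50 (by omega), pv_tab_last]

theorem pv_period_base (n : Nat) (h : n < 51) : pvStep^[n] 1 = pvRCON.getD (n % 51) 0 := by
  rw [Nat.mod_eq_of_lt h]
  exact pv_iter_tab n (by omega)

theorem pv_period (n : Nat) : pvStep^[n] 1 = pvRCON.getD (n % 51) 0 := by
  induction n using Nat.strong_induction_on with
  | _ n ih =>
    by_cases h : n < 51
    · exact pv_period_base n h
    · have hn : n - 51 + 51 = n := by omega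
      have : pvStep^[n] 1 = pvStep^[n - 51] 1 := by
        conv_lhs => rw [← hn]
        rw [Function.iterate_add_apply, pv_step51]
      rw [this, ih (n - 51) (by omega)]
      congr 1
      omega

-- ===== VERDICT (by name: the statement is the Claim_ definition above) =====
theorem RCon_spec : Claim_equal_RCon := by
  intro word i _ hpre
  unfold Spec_RCon
  obtain ⟨h, t, rfl⟩ : ∃ h t, word = h :: t := by
    cases word with
    | nil => exact absurd rfl hpre
    | cons h t => exact ⟨h, t, rfl⟩
  by_cases hi : i ≤ 1
  · have hr : PySem.List.pyRange 0 (i - 1) 1 = [] :=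
      PySem.List.pyRange_one_eq_nil (by omega)
    simp only [RCon, RCon_alt, hr, List.foldl_nil, if_pos hi]
    split_ifs <;> rfl
  · have hi2 : 2 ≤ i := by omega
    have hne : ¬ i = 0 := by omega
    have hlen : (PySem.List.pyRange 0 (i - 1) 1).length = (i - 1).toNat := by
      rw [PySem.List.length_pyRange_one]; congr 1; omega
    have hA : RCon (h :: t) i = (pvStep^[(i - 1).toNat] 1) :: t := by
      simp only [RCon, hne, if_false, List.set_cons_zero]
      rw [pv_fold_val, hlen]
    have hmod : PySem.Int.mod (i - 1) 51 = (((i - 1).toNat % 51 : Nat) : Int) := by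
      rw [PySem.Int.mod_eq_emod_of_pos (by omega)]
      omega
    have hBget : PySem.List.pyGetD pvRCON (PySem.Int.mod (i - 1) 51) 0
        = pvRCON.getD ((i - 1).toNat % 51) 0 := by
      rw [hmod, PySem.List.pyGetD_natCast]
    have hB : RCon_alt (h :: t) i
        = (pvRCON.getD ((i - 1).toNat % 51) 0) :: t := by
      simp only [RCon_alt, if_neg hi, hBget, List.set_cons_zero]
    rw [hA, hB, pv_period]
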